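-- pv_equiv track=rewrite | github.com/LegoNinja39/Math | Differentiation.py | splitFunction
-- ===== SOURCE A (Python) =====
-- SYMBOL_LIST = ['+', '-', '*', '/']
--
-- def splitFunction(fx: str) -> tuple[list[str], list[str]]:
--     """Parses the function"""
--
--     lastSubIndex = 0
--     subFunctions: list[str] = []
--     symbols: list[str] = []
--
--     # Find all the subfunctions
--     for i, e in enumerate(fx):
--         # When it finds an algebraic symbol
--         if SYMBOL_LIST.count(e) != 0 and fx[i-1].isnumeric():
--             # Puts the subfunctions and symbols into lists
--             subFunctions.append(fx[lastSubIndex:i])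
--             symbols.append(fx[i:i+1])
--
--             lastSubIndex = i + 1
--
--     # Gets the last subfuction
--     subFunctions.append(fx[lastSubIndex:])
--
--     # If there is a subtract symbol
--     # make the following number negative
--     # and set the symbol to addition
--     for i in range(len(symbols)):
--         if symbols[i] == '-':
--             subFunctions[i + 1] = symbols[i] + subFunctions[i + 1]
--             symbols[i] = '+'
--
--     return (subFunctions, symbols)
-- ===== SOURCE B (Python) =====
-- SYMBOL_LIST = ['+', '-', '*', '/']
--
-- def splitFunction(fx: str) -> tuple[list[str], list[str]]:
--     """Parses the function in a single pass with a pending-minus flag."""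
--     subFunctions: list[str] = []
--     symbols: list[str] = []
--     start = 0
--     pendingMinus = False
--     for i, e in enumerate(fx):
--         if e in SYMBOL_LIST and fx[i-1].isnumeric():
--             subFunctions.append(('-' if pendingMinus else '') + fx[start:i])
--             symbols.append('+' if e == '-' else e)
--             pendingMinus = (e == '-')
--             start = i + 1
--     subFunctions.append(('-' if pendingMinus else '') + fx[start:])
--     return (subFunctions, symbols)
-- ===== Notes on version B (the rewrite author's own statement) =====
-- stated objective: simpler
-- what changed: B parses in a single pass with a pending-minus flag that prefixes '-' to the next emitted segment and normalises the symbol to '+' as it is emitted, instead of A's two passes (collect, then a second mutation pass over the symbol list).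
import Mathlib
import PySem

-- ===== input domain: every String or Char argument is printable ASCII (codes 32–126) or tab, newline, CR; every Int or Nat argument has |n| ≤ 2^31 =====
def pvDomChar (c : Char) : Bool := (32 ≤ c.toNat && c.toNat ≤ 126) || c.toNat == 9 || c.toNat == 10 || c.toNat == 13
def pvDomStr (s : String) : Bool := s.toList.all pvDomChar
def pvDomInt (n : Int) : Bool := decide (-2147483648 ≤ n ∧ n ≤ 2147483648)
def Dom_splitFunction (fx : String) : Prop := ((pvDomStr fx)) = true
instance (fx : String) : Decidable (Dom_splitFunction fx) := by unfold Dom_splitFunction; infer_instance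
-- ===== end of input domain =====

-- B fuses A's two passes into one pass with a pending-minus flag (objective: simpler).

-- ===== PORT A =====
-- SYMBOL_LIST
def pvSymbols : List Char := ['+', '-', '*', '/']

-- one iteration of A's first loop: state = (lastSubIndex, subFunctions, symbols), p = (i, e).
-- `.isnumeric()` of the one-char string fx[i-1] is ported as Chars.isdigit of the char: exact on
-- the ASCII domain Dom_splitFunction.  fx[i-1] is always in range inside the loop, so pyGetD is exact.
def pvAStep (cs : List Char) (st : Int × List (List Char) × List (List Char)) (p : Int × Char) :
    Int × List (List Char) × List (List Char) :=
  if pvSymbols.count p.2 ≠ 0 ∧ PySem.Chars.isdigit (PySem.List.pyGetD cs (p.1 - 1) ' ') = true then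
    (p.1 + 1,
     st.2.1 ++ [PySem.List.slice cs (some st.1) (some p.1)],
     st.2.2 ++ [PySem.List.slice cs (some p.1) (some (p.1 + 1))])
  else st

-- one iteration of A's second loop (the '-' rewriting pass), state = (subFunctions, symbols)
def pvAStep2 (st : List (List Char) × List (List Char)) (i : Int) :
    List (List Char) × List (List Char) :=
  if PySem.List.pyGetD st.2 i [] = ['-'] then
    (PySem.List.pySetD st.1 (i + 1) (PySem.List.pyGetD st.2 i [] ++ PySem.List.pyGetD st.1 (i + 1) []),
     PySem.List.pySetD st.2 i ['+'])
  else st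

def splitFunction (fx : String) : List String × List String :=
  let cs := fx.toList
  let r1 := (PySem.List.enumerate cs 0).foldl (pvAStep cs) (0, [], [])
  let subs := r1.2.1 ++ [PySem.List.slice cs (some r1.1) none]
  let r2 := (PySem.List.pyRange 0 (r1.2.2.length : Int) 1).foldl pvAStep2 (subs, r1.2.2)
  (r2.1.map String.ofList, r2.2.map String.ofList)

-- ===== PORT B =====
-- '-' if pendingMinus else ''
def pvPfx (b : Bool) : List Char := if b then ['-'] else []

-- one iteration of B's single loop: state = (start, pendingMinus, subFunctions, symbols), p = (i, e)
def pvBStep (cs : List Char) (st : Int × Bool × List (List Char) × List (List Char)) (p : Int × Char) :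
    Int × Bool × List (List Char) × List (List Char) :=
  if p.2 ∈ pvSymbols ∧ PySem.Chars.isdigit (PySem.List.pyGetD cs (p.1 - 1) ' ') = true then
    (p.1 + 1,
     decide (p.2 = '-'),
     st.2.2.1 ++ [pvPfx st.2.1 ++ PySem.List.slice cs (some st.1) (some p.1)],
     st.2.2.2 ++ [if p.2 = '-' then ['+'] else [p.2]])
  else st

def splitFunction_alt (fx : String) : List String × List String :=
  let cs := fx.toList
  let r := (PySem.List.enumerate cs 0).foldl (pvBStep cs) (0, false, [], [])
  ((r.2.2.1 ++ [pvPfx r.2.1 ++ PySem.List.slice cs (some r.1) none]).map String.ofList,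
   r.2.2.2.map String.ofList)

-- ===== PRECONDITION & SPEC =====
def Spec_splitFunction (fx : String) (out : List String × List String) : Prop := out = splitFunction_alt fx
instance (fx : String) (out : List String × List String) : Decidable (Spec_splitFunction fx out) := by unfold Spec_splitFunction; infer_instance

-- ===== CLAIM (what is proved, stated in full; the proofs are below) =====
def Claim_equal_splitFunction : Prop := ∀ (fx : String), Dom_splitFunction fx → Spec_splitFunction fx (splitFunction fx)

-- ===== LEMMAS AND PROOFS =====

-- symbol conversion performed by A's second pass
def pvConv (s : List Char) : List Char := if s = ['-'] then ['+'] else s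

-- prefixing performed by A's second pass on subFunctions[i+1]
def pvF (v sub : List Char) : List Char := pvPfx (decide (v = ['-'])) ++ sub

-- B's subfunction list expressed from A's raw (phase-1) lists and the incoming pending flag
def pvZipPref (p : Bool) : List (List Char) → List (List Char) → List (List Char)
  | u :: us, v :: vs => (pvPfx p ++ u) :: pvZipPref (decide (v = ['-'])) us vs
  | _, _ => []

-- B's final pending flag from the incoming one and the raw symbols emitted
def pvLastFlag (p : Bool) : List (List Char) → Bool
  | [] => p
  | v :: vs => pvLastFlag (decide (v = ['-'])) vs

theorem foldA_append (cs : List Char) (L : List (Int × Char)) :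
    ∀ (l : Int) (s y : List (List Char)),
      L.foldl (pvAStep cs) (l, s, y) =
        ((L.foldl (pvAStep cs) (l, [], [])).1,
         s ++ (L.foldl (pvAStep cs) (l, [], [])).2.1,
         y ++ (L.foldl (pvAStep cs) (l, [], [])).2.2) := by
  induction L with
  | nil => intro l s y; simp
  | cons q L ih =>
      intro l s y
      simp only [List.foldl_cons, pvAStep, List.nil_append]
      split_ifs with h
      · rw [ih (q.1 + 1) (s ++ _) (y ++ _), ih (q.1 + 1) [_] [_]]
        simp
      · exact ih l s y

theorem foldB_append (cs : List Char) (L : List (Int × Char)) :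
    ∀ (l : Int) (p : Bool) (s y : List (List Char)),
      L.foldl (pvBStep cs) (l, p, s, y) =
        ((L.foldl (pvBStep cs) (l, p, [], [])).1,
         (L.foldl (pvBStep cs) (l, p, [], [])).2.1,
         s ++ (L.foldl (pvBStep cs) (l, p, [], [])).2.2.1,
         y ++ (L.foldl (pvBStep cs) (l, p, [], [])).2.2.2) := by
  induction L with
  | nil => intro l p s y; simp
  | cons q L ih =>
      intro l p s y
      simp only [List.foldl_cons, pvBStep, List.nil_append]
      by_cases h : (q.2 ∈ pvSymbols ∧
          PySem.Chars.isdigit (PySem.List.pyGetD cs (q.1 - 1) ' ') = true)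
      · rw [if_pos h, if_pos h, ih (q.1 + 1) _ (s ++ _) (y ++ _), ih (q.1 + 1) _ [_] [_]]
        simp
      · rw [if_neg h, if_neg h]
        exact ih l p s y

theorem lenA (cs : List Char) (L : List (Int × Char)) :
    ∀ (l : Int) (s y : List (List Char)), s.length = y.length →
      (L.foldl (pvAStep cs) (l, s, y)).2.1.length = (L.foldl (pvAStep cs) (l, s, y)).2.2.length := by
  induction L with
  | nil => intro l s y h; simpa using h
  | cons q L ih =>
      intro l s y h
      simp only [List.foldl_cons, pvAStep]
      split_ifs with hc
      · exact ih _ _ _ (by simp [h])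
      · exact ih _ _ _ h

-- the single-pass fold equals the raw first-pass fold post-processed by pvZipPref / pvConv / pvLastFlag
theorem loop_rel (cs : List Char) :
    ∀ (L : List (Int × Char)),
      (∀ q ∈ L, ∃ k : Nat, ∃ h : k < cs.length, q = ((k : Int), cs[k])) →
      ∀ (l : Int) (p : Bool),
        L.foldl (pvBStep cs) (l, p, [], []) =
          ((L.foldl (pvAStep cs) (l, [], [])).1,
           pvLastFlag p (L.foldl (pvAStep cs) (l, [], [])).2.2,
           pvZipPref p (L.foldl (pvAStep cs) (l, [], [])).2.1 (L.foldl (pvAStep cs) (l, [], [])).2.2,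
           (L.foldl (pvAStep cs) (l, [], [])).2.2.map pvConv) := by
  intro L
  induction L with
  | nil => intro _ l p; simp [pvLastFlag, pvZipPref]
  | cons q L ih =>
      intro hmem l p
      obtain ⟨k, hk, hq⟩ := hmem q (by simp)
      have hmem' : ∀ q ∈ L, ∃ k : Nat, ∃ h : k < cs.length, q = ((k : Int), cs[k]) :=
        fun r hr => hmem r (by simp [hr])
      subst hq
      have hcnt : (pvSymbols.count cs[k] ≠ 0) ↔ cs[k] ∈ pvSymbols := by
        simp [Ne, List.count_eq_zero]
      have hsym : PySem.List.slice cs (some (k : Int)) (some ((k : Int) + 1)) = [cs[k]] := by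
        have h1 : ((k : Int) + 1) = ((k + 1 : Nat) : Int) := by push_cast; ring
        have h2 : k + 1 - k = 1 := by omega
        rw [h1, PySem.List.slice_natCast, h2, List.drop_eq_getElem_cons hk]
        rfl
      simp only [List.foldl_cons, pvAStep, pvBStep, List.nil_append]
      by_cases hd : PySem.Chars.isdigit (PySem.List.pyGetD cs ((k : Int) - 1) ' ') = true
      · by_cases hm : cs[k] ∈ pvSymbols
        · have hB : (cs[k] ∈ pvSymbols ∧
              PySem.Chars.isdigit (PySem.List.pyGetD cs ((k : Int) - 1) ' ') = true) := ⟨hm, hd⟩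
          have hA2 : (pvSymbols.count cs[k] ≠ 0 ∧
              PySem.Chars.isdigit (PySem.List.pyGetD cs ((k : Int) - 1) ' ') = true) :=
            ⟨hcnt.mpr hm, hd⟩
          rw [if_pos hB, if_pos hA2, hsym]
          rw [foldB_append, foldA_append, ih hmem' ((k : Int) + 1) (decide (cs[k] = '-'))]
          simp [pvZipPref, pvLastFlag, pvConv]
        · rw [if_neg (fun h => hm h.1), if_neg (fun h => hm (hcnt.mp h.1))]
          exact ih hmem' l p
      · rw [if_neg (fun h => hd h.2), if_neg (fun h => hd h.2)]
        exact ih hmem' l p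

theorem getD_append_len (xs : List (List Char)) (y : List Char) (ys : List (List Char)) (d : List Char) :
    (xs ++ y :: ys).getD xs.length d = y := by
  simp [List.getD]

theorem set_append_len (xs : List (List Char)) (y v : List Char) (ys : List (List Char)) :
    (xs ++ y :: ys).set xs.length v = xs ++ v :: ys := by
  induction xs with
  | nil => simp
  | cons a xs ih => simp [ih]

-- characterisation of A's second pass as the zipWith of pvF (plus pvConv on the symbols)
theorem phase2_gen :
    ∀ (vs₂ vs₁ u0s us₂ : List (List Char)),
      u0s.length = vs₁.length + 1 → us₂.length = vs₂.length →
      (PySem.List.pyRange (vs₁.length : Int) (((vs₁.length + vs₂.length : Nat) : Nat) : Int) 1).foldl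
          pvAStep2 (u0s ++ us₂, vs₁ ++ vs₂)
        = (u0s ++ List.zipWith pvF vs₂ us₂, vs₁ ++ vs₂.map pvConv) := by
  intro vs₂
  induction vs₂ with
  | nil =>
      intro vs₁ u0s us₂ h0 h2
      have : us₂ = [] := List.eq_nil_of_length_eq_zero (by simpa using h2)
      subst this
      rw [PySem.List.pyRange_one_eq_nil (by simp)]
      simp
  | cons v vs₂ ih =>
      intro vs₁ u0s us₂ h0 h2
      cases us₂ with
      | nil => simp at h2
      | cons u us =>
          have hus : us.length = vs₂.length := by simpa using h2
          rw [PySem.List.pyRange_one_cons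
                (by simp only [List.length_cons]; push_cast; omega)]
          simp only [List.foldl_cons]
          have hget : PySem.List.pyGetD (vs₁ ++ v :: vs₂) (vs₁.length : Int) ([] : List Char) = v := by
            rw [PySem.List.pyGetD_natCast]
            exact getD_append_len _ _ _ _
          have hidx : ((vs₁.length : Int) + 1) = ((u0s.length : Nat) : Int) := by
            rw [h0]; push_cast; ring
          have hgetsub : PySem.List.pyGetD (u0s ++ u :: us) ((vs₁.length : Int) + 1) ([] : List Char) = u := by
            rw [hidx, PySem.List.pyGetD_natCast]
            exact getD_append_len _ _ _ _
          have hsetsub :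
              PySem.List.pySetD (u0s ++ u :: us) ((vs₁.length : Int) + 1) (v ++ u) = u0s ++ (v ++ u) :: us := by
            rw [hidx, PySem.List.pySetD_natCast]
            exact set_append_len _ _ _ _
          have hsetsym :
              PySem.List.pySetD (vs₁ ++ v :: vs₂) ((vs₁.length : Int)) (['+'] : List Char)
                = vs₁ ++ ['+'] :: vs₂ := by
            rw [PySem.List.pySetD_natCast]
            exact set_append_len _ _ _ _
          have hstep : pvAStep2 (u0s ++ u :: us, vs₁ ++ v :: vs₂) (vs₁.length : Int)
              = ((u0s ++ [pvF v u]) ++ us, (vs₁ ++ [pvConv v]) ++ vs₂) := by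
            unfold pvAStep2
            simp only [hget, hgetsub, hsetsub, hsetsym]
            by_cases hv : v = ['-']
            · rw [if_pos hv]
              simp [pvF, pvConv, pvPfx, hv]
            · rw [if_neg hv]
              simp [pvF, pvConv, pvPfx, hv]
          rw [hstep]
          have e1 : ((vs₁.length : Int) + 1) = (((vs₁ ++ [pvConv v]).length : Nat) : Int) := by
            simp
          have e2 : (((vs₁.length + (v :: vs₂).length : Nat) : Nat) : Int)
              = ((((vs₁ ++ [pvConv v]).length + vs₂.length : Nat) : Nat) : Int) := by
            push_cast [List.length_append, List.length_cons, List.length_nil]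
            ring
          rw [e1, e2, ih (vs₁ ++ [pvConv v]) (u0s ++ [pvF v u]) us (by simp [h0]) hus]
          simp

theorem phase2_zero (vs₂ u0s us₂ : List (List Char))
    (h0 : u0s.length = 1) (h2 : us₂.length = vs₂.length) :
    (PySem.List.pyRange 0 ((vs₂.length : Nat) : Int) 1).foldl pvAStep2 (u0s ++ us₂, vs₂)
      = (u0s ++ List.zipWith pvF vs₂ us₂, vs₂.map pvConv) := by
  have h := phase2_gen vs₂ [] u0s us₂ (by simpa using h0) h2
  simpa using h

-- B's tail (zipPref plus the last, pending-prefixed segment) equals A's zipWith form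
theorem trail_eq :
    ∀ (us vs : List (List Char)) (v₀ seg : List Char), us.length = vs.length →
      pvZipPref (decide (v₀ = ['-'])) us vs ++ [pvPfx (pvLastFlag (decide (v₀ = ['-'])) vs) ++ seg]
        = List.zipWith pvF (v₀ :: vs) (us ++ [seg]) := by
  intro us
  induction us with
  | nil =>
      intro vs v₀ seg h
      have : vs = [] := List.eq_nil_of_length_eq_zero (by simpa using h.symm)
      subst this
      simp [pvZipPref, pvLastFlag, pvF]
  | cons u us ih =>
      intro vs v₀ seg h
      cases vs with
      | nil => simp at h
      | cons v vs =>
          have h' : us.length = vs.length := by simpa using h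
          simp only [pvZipPref, pvLastFlag, List.cons_append, List.zipWith_cons_cons]
          rw [ih vs v seg h']
          simp [pvF]

theorem splitFunction_eq (fx : String) : splitFunction fx = splitFunction_alt fx := by
  show (let cs := fx.toList
    let r1 := (PySem.List.enumerate cs 0).foldl (pvAStep cs) (0, [], [])
    let subs := r1.2.1 ++ [PySem.List.slice cs (some r1.1) none]
    let r2 := (PySem.List.pyRange 0 (r1.2.2.length : Int) 1).foldl pvAStep2 (subs, r1.2.2)
    (r2.1.map String.ofList, r2.2.map String.ofList)) =
    (let cs := fx.toList
     let r := (PySem.List.enumerate cs 0).foldl (pvBStep cs) (0, false, [], [])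
     ((r.2.2.1 ++ [pvPfx r.2.1 ++ PySem.List.slice cs (some r.1) none]).map String.ofList,
      r.2.2.2.map String.ofList))
  simp only []
  set cs := fx.toList with hcs
  have hmem : ∀ q ∈ PySem.List.enumerate cs 0, ∃ k : Nat, ∃ h : k < cs.length, q = ((k : Int), cs[k]) := by
    intro q hq
    rw [PySem.List.mem_enumerate_iff] at hq
    obtain ⟨k, h, rfl⟩ := hq
    exact ⟨k, h, by simp⟩
  rw [loop_rel cs (PySem.List.enumerate cs 0) hmem 0 false]
  set rA := (PySem.List.enumerate cs 0).foldl (pvAStep cs) (0, [], []) with hrA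
  have hlen : rA.2.1.length = rA.2.2.length := lenA cs _ 0 [] [] rfl
  simp only []
  set seg := PySem.List.slice cs (some rA.1) none with hseg
  cases hA : rA.2.1 with
  | nil =>
      have hy : rA.2.2 = [] := List.eq_nil_of_length_eq_zero (by rw [← hlen, hA]; rfl)
      rw [hy]
      simp only [List.length_nil, Nat.cast_zero, List.nil_append]
      rw [PySem.List.pyRange_one_eq_nil le_rfl]
      simp [pvZipPref, pvLastFlag, pvPfx]
  | cons u us =>
      cases hY : rA.2.2 with
      | nil =>
          exfalso
          rw [hA, hY] at hlen
          simp at hlen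
      | cons v vs =>
          have hlen' : us.length = vs.length := by
            rw [hA, hY] at hlen; simpa using hlen
          rw [show ((u :: us) ++ [seg]) = [u] ++ (us ++ [seg]) by simp]
          rw [phase2_zero (v :: vs) [u] (us ++ [seg]) rfl (by simp [hlen'])]
          simp only [pvZipPref, pvLastFlag]
          have ht := trail_eq us vs v seg hlen'
          refine congrArg₂ Prod.mk (congrArg (List.map String.ofList) ?_) rfl
          rw [← ht]
          simp [pvPfx]

-- ===== VERDICT (by name: the statement is the Claim_ definition above) =====
theorem splitFunction_spec : Claim_equal_splitFunction := by
  intro fx _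
  unfold Spec_splitFunction
  exact splitFunction_eq fx
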